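-- pv_equiv track=rewrite | github.com/zirinisp/iagtm-agent | services/reports/generate-pagema-pnl.py | group_labels_by_section
-- ===== SOURCE A (Python) =====
-- def is_total_row(label):
--     return label.startswith('__TOTAL__') or label.startswith('__KEY__')
--
-- def group_labels_by_section(labels):
--     """Group labels into sections based on Total/Key markers."""
--     sections = []
--     current_items = []
--     for label in labels:
--         current_items.append(label)
--         if is_total_row(label):
--             sections.append(current_items)
--             current_items = []
--     if current_items:
--         sections.append(current_items)
--     return sections
-- ===== SOURCE B (Python) =====
-- def is_total_row(label):
--     return label.startswith('__TOTAL__') or label.startswith('__KEY__')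
--
-- def group_labels_by_section(labels):
--     """Group labels into sections: first find boundary indices, then slice."""
--     boundaries = [i for i, label in enumerate(labels) if is_total_row(label)]
--     sections = []
--     start = 0
--     for b in boundaries:
--         sections.append(labels[start:b + 1])
--         start = b + 1
--     if start < len(labels):
--         sections.append(labels[start:])
--     return sections
-- ===== Notes on version B (the rewrite author's own statement) =====
-- stated objective: alternative
-- what changed: B replaces A's single forward pass with an accumulating current-section list by two staged passes: one pass collecting the boundary indices where the marker predicate holds, then a second pass slicing the label list between consecutive boundaries (plus the non-empty tail).
import Mathlib
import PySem

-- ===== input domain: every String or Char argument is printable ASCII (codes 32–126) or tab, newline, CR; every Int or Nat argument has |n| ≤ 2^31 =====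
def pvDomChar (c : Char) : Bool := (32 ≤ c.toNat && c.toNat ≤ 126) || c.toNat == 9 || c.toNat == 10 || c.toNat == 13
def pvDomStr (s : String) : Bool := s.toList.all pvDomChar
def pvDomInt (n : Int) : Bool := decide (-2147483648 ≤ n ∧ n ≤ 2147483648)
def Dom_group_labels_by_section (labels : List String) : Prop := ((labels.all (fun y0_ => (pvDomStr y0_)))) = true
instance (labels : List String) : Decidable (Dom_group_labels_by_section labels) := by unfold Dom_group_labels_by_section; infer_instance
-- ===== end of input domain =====

-- B replaces A's single accumulating pass by two staged passes — first collect the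
-- boundary indices (marker positions), then slice the label list between them;
-- objective: alternative (same O(n) cost, different decomposition).

-- ===== PORT A =====
def isTotalRow (label : String) : Bool :=
  PySem.Str.startswith label "__TOTAL__" || PySem.Str.startswith label "__KEY__"

def group_labels_by_section (labels : List String) : List (List String) :=
  let st := labels.foldl
    (fun (acc : List (List String) × List String) label =>
      let cur := acc.2 ++ [label]
      if isTotalRow label then (acc.1 ++ [cur], []) else (acc.1, cur))
    ([], [])
  if st.2 ≠ [] then st.1 ++ [st.2] else st.1

-- ===== PORT B =====
def isTotalRowAlt (label : String) : Bool :=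
  PySem.Str.startswith label "__TOTAL__" || PySem.Str.startswith label "__KEY__"

def group_labels_by_section_alt (labels : List String) : List (List String) :=
  -- pass 1: boundary indices (where the marker predicate holds)
  let boundaries := (PySem.List.enumerate labels).filterMap
    (fun p => if isTotalRowAlt p.2 then some p.1 else none)
  -- pass 2: slice between consecutive boundaries
  let st := boundaries.foldl
    (fun (acc : List (List String) × Int) b =>
      (acc.1 ++ [PySem.List.slice labels (some acc.2) (some (b + 1))], b + 1))
    ([], 0)
  if st.2 < (labels.length : Int) then
    st.1 ++ [PySem.List.slice labels (some st.2) none]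
  else st.1

-- ===== PRECONDITION & SPEC =====
def Spec_group_labels_by_section (labels : List String) (out : List (List String)) : Prop := out = group_labels_by_section_alt labels
instance (labels : List String) (out : List (List String)) : Decidable (Spec_group_labels_by_section labels out) := by unfold Spec_group_labels_by_section; infer_instance

-- ===== CLAIM (what is proved, stated in full; the proofs are below) =====
def Claim_equal_group_labels_by_section : Prop := ∀ (labels : List String), Dom_group_labels_by_section labels → Spec_group_labels_by_section labels (group_labels_by_section labels)

-- ===== LEMMAS AND PROOFS =====

-- canonical recursive grouping both ports are reduced to
def specRec : List String → List (List String)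
  | [] => []
  | l :: ls =>
    if isTotalRow l then [l] :: specRec ls
    else match specRec ls with
      | [] => [[l]]
      | s :: rest => (l :: s) :: rest

def mergeCur (cur : List String) (r : List (List String)) : List (List String) :=
  if cur = [] then r
  else match r with
    | [] => [cur]
    | s :: rest => (cur ++ s) :: rest

-- A's loop with arbitrary starting state
theorem loopA (labels : List String) : ∀ (sections : List (List String)) (cur : List String),
    (let st := labels.foldl
        (fun (acc : List (List String) × List String) label =>
          let cur := acc.2 ++ [label]
          if isTotalRow label then (acc.1 ++ [cur], []) else (acc.1, cur))
        (sections, cur)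
      if st.2 ≠ [] then st.1 ++ [st.2] else st.1)
      = sections ++ mergeCur cur (specRec labels) := by
  induction labels with
  | nil =>
    intro sections cur
    simp only [List.foldl, specRec, mergeCur]
    by_cases h : cur = [] <;> simp [h]
  | cons l ls ih =>
    intro sections cur
    simp only [List.foldl, specRec]
    by_cases h : isTotalRow l
    · simp only [h, if_true]
      rw [ih]
      by_cases hc : cur = [] <;> simp [mergeCur, hc]
    · simp only [h]
      rw [ih]
      rcases hr : specRec ls with _ | ⟨s, rest⟩ <;>
        by_cases hc : cur = [] <;> simp [mergeCur, hc]

-- B-side helpers: recursive characterisation of pass 1 and pass 2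
def bnd (s : Int) : List String → List Int
  | [] => []
  | l :: ls => if isTotalRowAlt l then s :: bnd (s + 1) ls else bnd (s + 1) ls

theorem enumFilter : ∀ (ls : List String) (s : Int),
    (PySem.List.enumerate ls s).filterMap
      (fun p => if isTotalRowAlt p.2 then some p.1 else none) = bnd s ls := by
  intro ls
  induction ls with
  | nil => intro s; simp [PySem.List.enumerate_nil, bnd]
  | cons l ls ih =>
    intro s
    rw [PySem.List.enumerate_cons]
    by_cases h : isTotalRowAlt l <;> simp [h, bnd, ih]

def runB (full : List String) (bs : List Int) (acc : List (List String)) (start : Int) :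
    List (List String) :=
  let st := bs.foldl
    (fun (a : List (List String) × Int) b =>
      (a.1 ++ [PySem.List.slice full (some a.2) (some (b + 1))], b + 1))
    (acc, start)
  if st.2 < (full.length : Int) then
    st.1 ++ [PySem.List.slice full (some st.2) none]
  else st.1

theorem isTotalRow_eq : isTotalRow = isTotalRowAlt := rfl

theorem runB_bnd (full : List String) : ∀ (ls : List String) (s t : Nat)
    (acc : List (List String)), t ≤ s → full.drop s = ls →
    runB full (bnd (s : Int) ls) acc (t : Int)
      = acc ++ mergeCur ((full.drop t).take (s - t)) (specRec ls) := by
  intro ls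
  induction ls with
  | nil =>
    intro s t acc hts hdrop
    have hlen : full.length ≤ s := List.drop_eq_nil_iff.mp hdrop
    have htake : (full.drop t).take (s - t) = full.drop t :=
      List.take_of_length_le (by simp [List.length_drop]; omega)
    simp only [runB, bnd, List.foldl_nil, specRec, mergeCur, htake]
    by_cases hlt : t < full.length
    · have hne : full.drop t ≠ [] := by
        simp [List.drop_eq_nil_iff]; omega
      simp [hne, PySem.List.slice_from_natCast, hlt]
    · have heq : full.drop t = [] := List.drop_eq_nil_iff.mpr (by omega)
      simp [heq, hlt]
  | cons l ls ih =>
    intro s t acc hts hdrop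
    have hgetl : full[s]? = some l := by
      have h1 : (full.drop s)[0]? = full[s + 0]? := List.getElem?_drop
      rw [hdrop] at h1
      simpa using h1.symm
    have hslen : s < full.length := by
      obtain ⟨h, -⟩ := List.getElem?_eq_some_iff.mp hgetl
      exact h
    have hdrop' : full.drop (s + 1) = ls := by
      have : full.drop (s + 1) = (full.drop s).drop 1 := by
        rw [List.drop_drop]
      simp [this, hdrop]
    have htake_succ : ∀ u : Nat, u ≤ s →
        (full.drop u).take (s - u + 1) = (full.drop u).take (s - u) ++ [l] := by
      intro u hu
      rw [List.take_add_one]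
      congr 1
      have hidx : (full.drop u)[s - u]? = full[u + (s - u)]? := List.getElem?_drop
      rw [hidx, Nat.add_sub_cancel' hu, hgetl]
      rfl
    rw [show specRec (l :: ls)
        = if isTotalRow l then [l] :: specRec ls
          else (match specRec ls with
                | [] => [[l]]
                | s :: rest => (l :: s) :: rest) from rfl]
    by_cases h : isTotalRowAlt l
    · -- boundary at s: flush labels[t:s+1] and restart at s+1
      rw [isTotalRow_eq, h, if_pos rfl]
      simp only [bnd, h, if_true]
      have hstep : runB full ((s : Int) :: bnd ((s : Int) + 1) ls) acc (t : Int)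
          = runB full (bnd ((s : Int) + 1) ls)
              (acc ++ [PySem.List.slice full (some (t : Int)) (some ((s : Int) + 1))])
              ((s : Int) + 1) := by
        simp [runB, List.foldl_cons]
      rw [hstep]
      have hcast : ((s : Int) + 1) = ((s + 1 : Nat) : Int) := by push_cast; ring
      rw [hcast, ih (s + 1) (s + 1) _ le_rfl hdrop']
      have hslice : PySem.List.slice full (some (t : Int)) (some ((s + 1 : Nat) : Int))
          = (full.drop t).take (s - t) ++ [l] := by
        rw [PySem.List.slice_natCast]
        rw [show s + 1 - t = s - t + 1 by omega]
        exact htake_succ t hts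
      rw [hslice]
      simp only [Nat.sub_self, List.take_zero]
      rcases hc : (full.drop t).take (s - t) with _ | ⟨x, xs⟩ <;>
        simp [mergeCur]
    · -- no boundary at s: the pending run grows by l
      simp only [isTotalRow_eq, bnd, h, Bool.false_eq_true, if_false]
      have hcast : ((s : Int) + 1) = ((s + 1 : Nat) : Int) := by push_cast; ring
      rw [hcast, ih (s + 1) t _ (by omega) hdrop']
      rw [show s + 1 - t = s - t + 1 by omega, htake_succ t hts]
      rcases hr : specRec ls with _ | ⟨x, rest⟩ <;>
        rcases hc : (full.drop t).take (s - t) with _ | ⟨y, ys⟩ <;>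
          simp [mergeCur]

theorem altRec (labels : List String) : group_labels_by_section_alt labels = specRec labels := by
  unfold group_labels_by_section_alt
  rw [enumFilter labels 0]
  have h := runB_bnd labels labels 0 0 [] le_rfl (by simp)
  simp only [runB] at h
  simpa [mergeCur] using h

-- ===== VERDICT (by name: the statement is the Claim_ definition above) =====
theorem group_labels_by_section_spec : Claim_equal_group_labels_by_section := by
  intro labels _
  unfold Spec_group_labels_by_section group_labels_by_section
  rw [altRec, loopA labels [] []]
  simp [mergeCur]
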